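-- pv_equiv track=rewrite | github.com/pirlouix-dev/PDLS | src/main.py | GetSeasonString
-- ===== SOURCE A (Python) =====
-- def GetSeasonString(SeasonList):
--     SeasonCount = len(SeasonList)
--     if SeasonCount == 4:
--         return "Toutes saisons"
--
--     SeasonStrings = ["Printemps", "Été", "Automne", "Hiver"]
--     StringResult = ""
--
--     for i, v in enumerate(SeasonList):
--         Separator = "" if i == 0 else ", " if i != SeasonCount - 1 else " et "
--         StringResult += Separator + SeasonStrings[v]
--
--     return StringResult
-- ===== SOURCE B (Python) =====
-- def GetSeasonString(SeasonList):
--     if len(SeasonList) == 4: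
--         return "Toutes saisons"
--     names = ["Printemps", "Été", "Automne", "Hiver"]
--
--     def rec(lst):
--         if len(lst) == 1:
--             return names[lst[0]]
--         if len(lst) == 2:
--             return names[lst[0]] + " et " + names[lst[1]]
--         return names[lst[0]] + ", " + rec(lst[1:])
--
--     return rec(SeasonList) if SeasonList else ""
-- ===== Notes on version B (the rewrite author's own statement) =====
-- stated objective: alternative
-- what changed: Replaces the indexed accumulation loop (enumerate with an index-based separator branch) by a structural recursion on the list suffix whose base cases (one and two remaining elements) determine the separators, with no index arithmetic.
-- outside the precondition, e.g. on GetSeasonString([5]): A raises IndexError, B raises IndexError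
import Mathlib
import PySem

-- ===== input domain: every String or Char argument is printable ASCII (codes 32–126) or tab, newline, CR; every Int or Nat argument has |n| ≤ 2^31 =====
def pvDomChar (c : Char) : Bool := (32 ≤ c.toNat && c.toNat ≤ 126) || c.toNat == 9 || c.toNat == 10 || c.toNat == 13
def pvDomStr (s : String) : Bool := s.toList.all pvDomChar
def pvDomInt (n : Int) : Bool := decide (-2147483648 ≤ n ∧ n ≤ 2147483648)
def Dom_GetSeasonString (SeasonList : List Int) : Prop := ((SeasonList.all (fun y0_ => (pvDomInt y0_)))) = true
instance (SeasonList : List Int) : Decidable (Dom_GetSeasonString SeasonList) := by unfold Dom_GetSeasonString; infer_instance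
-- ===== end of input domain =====

-- B replaces A's indexed accumulation loop by a structural recursion on the list suffix
-- whose one- and two-element base cases determine the separators (objective: alternative).


-- ===== PORT A =====
-- SeasonStrings[v] raises IndexError for v outside -4..3; Pre_ excludes those inputs, the .getD "" is never reached there.
def GetSeasonString (SeasonList : List Int) : String :=
  if (SeasonList.length : Int) = 4 then "Toutes saisons"
  else
    (PySem.List.enumerate SeasonList).foldl
      (fun StringResult iv =>
        StringResult ++
          ((if iv.1 = 0 then "" else if iv.1 ≠ (SeasonList.length : Int) - 1 then ", " else " et ") ++
            (PySem.List.pyGet? ["Printemps", "Été", "Automne", "Hiver"] iv.2).getD ""))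
      ""

-- ===== PORT B =====
-- Source B's names[v]; out-of-range v is excluded by Pre_, the .getD "" is never reached there.
def pvSeasonName (v : Int) : String :=
  (PySem.List.pyGet? ["Printemps", "Été", "Automne", "Hiver"] v).getD ""

-- Source B's inner rec: len==1 / len==2 base cases, otherwise head ++ ", " ++ rec(tail).
-- rec is never called on [] in Source B (the outer guard returns "" there); the [] arm is that guard's value.
def pvRec : List Int → String
  | [] => ""
  | [x] => pvSeasonName x
  | [x, y] => pvSeasonName x ++ " et " ++ pvSeasonName y
  | x :: y :: z :: t => pvSeasonName x ++ ", " ++ pvRec (y :: z :: t)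

def GetSeasonString_alt (SeasonList : List Int) : String :=
  if (SeasonList.length : Int) = 4 then "Toutes saisons"
  else match SeasonList with
    | [] => ""
    | l => pvRec l

-- ===== PRECONDITION & SPEC =====
-- Pre_ excludes exactly the inputs where Python A raises IndexError: an element outside -4..3
-- in a list whose length is not 4 (with length 4 A returns before indexing).
def Pre_GetSeasonString (SeasonList : List Int) : Prop :=
  SeasonList.length = 4 ∨ ∀ v ∈ SeasonList, -4 ≤ v ∧ v < 4

instance (SeasonList : List Int) : Decidable (Pre_GetSeasonString SeasonList) := by
  unfold Pre_GetSeasonString; infer_instance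

def pvWitness_GetSeasonString : List Int := [0, 2]

def Spec_GetSeasonString (SeasonList : List Int) (out : String) : Prop := out = GetSeasonString_alt SeasonList
instance (SeasonList : List Int) (out : String) : Decidable (Spec_GetSeasonString SeasonList out) := by unfold Spec_GetSeasonString; infer_instance

-- ===== CLAIM (what is proved, stated in full; the proofs are below) =====
def Claim_equal_GetSeasonString : Prop := ∀ (SeasonList : List Int), Dom_GetSeasonString SeasonList → Pre_GetSeasonString SeasonList → Spec_GetSeasonString SeasonList (GetSeasonString SeasonList)

-- ===== LEMMAS AND PROOFS =====

-- the string contributed by the elements after the first one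
def pvTailStr : List String → String
  | [] => ""
  | [x] => " et " ++ x
  | x :: y :: t => ", " ++ x ++ pvTailStr (y :: t)

-- A's loop over the elements with index ≥ 1 produces pvTailStr of their names
theorem pv_loopA (n : Int) (l : List Int) :
    ∀ (j : Int) (acc : String), 1 ≤ j → j + l.length = n →
    (PySem.List.enumerate l j).foldl
      (fun StringResult iv =>
        StringResult ++
          ((if iv.1 = 0 then "" else if iv.1 ≠ n - 1 then ", " else " et ") ++
            (PySem.List.pyGet? ["Printemps", "Été", "Automne", "Hiver"] iv.2).getD ""))
      acc = acc ++ pvTailStr (l.map pvSeasonName) := by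
  induction l with
  | nil =>
      intro j acc hj hn
      simp [PySem.List.enumerate_nil, pvTailStr]
  | cons x t ih =>
      intro j acc hj hn
      rw [PySem.List.enumerate_cons]
      cases t with
      | nil =>
          have hj0 : ¬ j = 0 := by omega
          have hjl : j = n - 1 := by simp at hn; omega
          have hn1 : ¬ n - 1 = 0 := by omega
          simp [PySem.List.enumerate_nil, hjl, hn1, pvTailStr, pvSeasonName]
      | cons y t' =>
          have hj0 : ¬ j = 0 := by omega
          have hjl : j ≠ n - 1 := by simp at hn; omega
          simp only [List.foldl_cons]
          rw [if_neg hj0, if_pos hjl,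
            ih (j + 1) _ (by omega) (by simp at hn ⊢; omega)]
          simp [pvTailStr, pvSeasonName, String.append_assoc]

-- B's recursion equals head-name ++ pvTailStr of the rest
theorem pv_recB (rest : List Int) :
    ∀ (x : Int), pvRec (x :: rest) = pvSeasonName x ++ pvTailStr (rest.map pvSeasonName) := by
  induction rest with
  | nil => intro x; simp [pvRec, pvTailStr]
  | cons y t ih =>
      intro x
      cases t with
      | nil => simp [pvRec, pvTailStr, String.append_assoc]
      | cons z t' =>
          show pvSeasonName x ++ ", " ++ pvRec (y :: z :: t') = _
          rw [ih y]
          simp [pvTailStr, String.append_assoc]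

-- ===== VERDICT (by name: the statement is the Claim_ definition above) =====
theorem GetSeasonString_spec : Claim_equal_GetSeasonString := by
  unfold Claim_equal_GetSeasonString
  intro SeasonList _ _
  unfold Spec_GetSeasonString GetSeasonString GetSeasonString_alt
  by_cases h4 : (SeasonList.length : Int) = 4
  · simp [h4]
  · simp only [h4, if_false]
    cases SeasonList with
    | nil => simp [PySem.List.enumerate_nil]
    | cons x rest =>
        rw [PySem.List.enumerate_cons, List.foldl_cons,
          pv_loopA ((x :: rest).length : Int) rest (0 + 1) _ (by omega)
            (by simp [List.length_cons]; omega)]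
        have hacc : ("" ++ ((if (0 : Int) = 0 then ""
              else if (0 : Int) ≠ ((x :: rest).length : Int) - 1 then ", " else " et ") ++
              (PySem.List.pyGet? ["Printemps", "Été", "Automne", "Hiver"] x).getD ""))
            = pvSeasonName x := by
          simp [pvSeasonName, String.empty_append]
        rw [hacc]
        exact (pv_recB rest x).symm
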